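-- pv_equiv track=rewrite | github.com/swatibajaj54/genome_sequencing | genome_sequencing.py | overlap_graph_problem
-- ===== SOURCE A (Python) =====
-- def overlap_graph_problem(patterns):
--     """Input: A collection Patterns of k-mers.
--     Output: The overlap graph Overlap(Patterns), in the form of an adjacency list. (in any order)"""
--     k = len(patterns[0])
--     prefix_dict = {}
--     adjacency_list = {}
--     for item in patterns:
--         key = item[0: k - 1]
--         val = prefix_dict.get(key)
--         val = val + " " if val else ""
--         val = val + item
--         prefix_dict[key] = val
--     for key in patterns:
--         suffix = key[1:k]
--         if prefix_dict.get(suffix):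
--             adjacency_list[key] = prefix_dict.get(suffix)
--     return adjacency_list
-- ===== SOURCE B (Python) =====
-- def overlap_graph_problem(patterns):
--     """Input: A collection Patterns of k-mers.
--     Output: The overlap graph Overlap(Patterns), in the form of an adjacency list. (in any order)"""
--     k = len(patterns[0])
--     adjacency_list = {}
--     for p in patterns:
--         suffix = p[1:k]
--         val = ""
--         for q in patterns:
--             if q[0:k - 1] == suffix:
--                 val = val + " " + q if val else q
--         if val:
--             adjacency_list[p] = val
--     return adjacency_list
-- ===== Notes on version B (the rewrite author's own statement) =====
-- stated objective: simpler
-- what changed: Replaces A's two-pass prefix-index dict by a direct per-pattern nested scan over all patterns that accumulates the space-separated neighbour string on the fly; no index structure is built. Pre_ excludes only the empty list, on which A raises IndexError at patterns[0].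
import Mathlib
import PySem

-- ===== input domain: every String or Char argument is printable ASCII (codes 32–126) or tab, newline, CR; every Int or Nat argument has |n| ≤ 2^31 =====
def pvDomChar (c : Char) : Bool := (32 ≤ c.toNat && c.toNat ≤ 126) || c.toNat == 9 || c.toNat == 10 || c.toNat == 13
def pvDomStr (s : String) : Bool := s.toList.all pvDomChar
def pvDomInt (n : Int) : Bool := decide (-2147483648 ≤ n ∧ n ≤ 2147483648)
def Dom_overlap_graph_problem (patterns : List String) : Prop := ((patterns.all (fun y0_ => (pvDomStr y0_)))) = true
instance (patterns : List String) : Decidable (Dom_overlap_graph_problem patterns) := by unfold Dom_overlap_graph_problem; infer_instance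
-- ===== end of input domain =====

-- B replaces A's two-pass prefix-index dict by a direct per-pattern nested scan that accumulates
-- the space-separated neighbour string on the fly — simpler, no index structure (not faster).

-- ===== PORT A =====
-- item[0 : k-1] (shared slice helper, used by both ports)
def pvKeyOf (k : Int) (q : String) : String := PySem.Str.slice q (some 0) (some (k - 1))
-- item[1 : k]
def pvSufOf (k : Int) (p : String) : String := PySem.Str.slice p (some 1) (some k)

-- one iteration of A's first loop (prefix_dict accumulation)
def pvStepA (k : Int) (d : PySem.Dict String String) (item : String) : PySem.Dict String String :=
  let key := pvKeyOf k item
  let val := match d.get? key with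
    | some v => if v ≠ "" then v ++ " " else ""
    | none => ""
  d.insert key (val ++ item)

def overlap_graph_problem (patterns : List String) : List (String × String) :=
  match PySem.List.pyGet? patterns 0 with
  | none => []  -- unreachable under Pre_: Python raises IndexError on patterns[0]
  | some p0 =>
    let k := PySem.Str.len p0
    let prefix_dict := patterns.foldl (pvStepA k) PySem.Dict.empty
    let adj := patterns.foldl (fun a key =>
      match prefix_dict.get? (pvSufOf k key) with
      | some v => if v ≠ "" then a.insert key v else a   -- 'if prefix_dict.get(suffix):' (truthiness)
      | none => a) PySem.Dict.empty
    adj.items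

-- ===== PORT B =====
def overlap_graph_problem_alt (patterns : List String) : List (String × String) :=
  match PySem.List.pyGet? patterns 0 with
  | none => []  -- unreachable under Pre_: Python raises IndexError on patterns[0]
  | some p0 =>
    let k := PySem.Str.len p0
    (patterns.foldl (fun adj p =>
        let suffix := pvSufOf k p
        let val := patterns.foldl (fun val q =>
          if pvKeyOf k q == suffix then (if val ≠ "" then val ++ " " ++ q else q) else val) ""
        if val ≠ "" then adj.insert p val else adj)
      PySem.Dict.empty).items

-- ===== PRECONDITION & SPEC =====
-- Pre_ excludes only the empty list, on which A raises IndexError at patterns[0] (B too).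
def Pre_overlap_graph_problem (patterns : List String) : Prop := patterns ≠ []
instance (patterns : List String) : Decidable (Pre_overlap_graph_problem patterns) := by
  unfold Pre_overlap_graph_problem; infer_instance
def pvWitness_overlap_graph_problem : List String := ["ab", "bc"]

def Spec_overlap_graph_problem (patterns : List String) (out : List (String × String)) : Prop := out = overlap_graph_problem_alt patterns
instance (patterns : List String) (out : List (String × String)) : Decidable (Spec_overlap_graph_problem patterns out) := by unfold Spec_overlap_graph_problem; infer_instance

-- ===== CLAIM (what is proved, stated in full; the proofs are below) =====
def Claim_equal_overlap_graph_problem : Prop := ∀ (patterns : List String), Dom_overlap_graph_problem patterns → Pre_overlap_graph_problem patterns → Spec_overlap_graph_problem patterns (overlap_graph_problem patterns)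

-- ===== LEMMAS AND PROOFS =====

-- A's accumulator step, as a two-argument function of the previous value (None and "" coincide).
def pvAcc (v item : String) : String := (if v ≠ "" then v ++ " " else "") ++ item

lemma pvStepA_eq_insert_acc (k : Int) (d : PySem.Dict String String) (item : String) :
    pvStepA k d item =
      d.insert (pvKeyOf k item) (pvAcc ((d.get? (pvKeyOf k item)).getD "") item) := by
  unfold pvStepA pvAcc
  cases h : d.get? (pvKeyOf k item) with
  | none => simp [h]
  | some v => by_cases hv : v = "" <;> simp [h, hv]

-- characterization of A's prefix_dict: a lookup is the pvAcc-fold of the key's group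
lemma pvGet_prefix_dict (k : Int) (l : List String) (d : PySem.Dict String String) (s : String) :
    (l.foldl (pvStepA k) d).get? s =
      (if l.filter (fun q => pvKeyOf k q == s) = [] then d.get? s
       else some ((l.filter (fun q => pvKeyOf k q == s)).foldl pvAcc ((d.get? s).getD ""))) := by
  induction l generalizing d with
  | nil => simp
  | cons x t ih =>
    simp only [List.foldl_cons, List.filter_cons]
    rw [ih, pvStepA_eq_insert_acc]
    by_cases hx : pvKeyOf k x = s
    · by_cases ht : t.filter (fun q => pvKeyOf k q == s) = [] <;>
        simp [hx, ht]
    · have hg : (d.insert (pvKeyOf k x) (pvAcc ((d.get? (pvKeyOf k x)).getD "") x)).get? s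
          = d.get? s := by
        rw [PySem.Dict.get?_insert]; exact if_neg (fun hh => hx hh.symm)
      simp [hx, hg]

-- B's inner accumulation step coincides with pvAcc
lemma pvStepB_eq_acc (v q : String) :
    (if v ≠ "" then v ++ " " ++ q else q) = pvAcc v q := by
  unfold pvAcc
  by_cases hv : v = "" <;> simp [hv]

-- B's inner loop is the pvAcc-fold of the suffix's match group
lemma pvValB_eq_filter_fold (k : Int) (l : List String) (s : String) :
    l.foldl (fun val q =>
        if pvKeyOf k q == s then (if val ≠ "" then val ++ " " ++ q else q) else val) "" =
      (l.filter (fun q => pvKeyOf k q == s)).foldl pvAcc "" := by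
  rw [List.foldl_filter]
  congr 1
  funext v q
  by_cases hq : (pvKeyOf k q == s) = true
  · rw [if_pos hq, if_pos hq, pvStepB_eq_acc]
  · rw [if_neg hq, if_neg hq]

-- ===== VERDICT (by name: the statement is the Claim_ definition above) =====
theorem overlap_graph_problem_spec : Claim_equal_overlap_graph_problem := by
  intro patterns _ hpre
  obtain ⟨p0, t0, rfl⟩ := List.exists_cons_of_ne_nil hpre
  show overlap_graph_problem (p0 :: t0) = overlap_graph_problem_alt (p0 :: t0)
  have hget : PySem.List.pyGet? (p0 :: t0) (0 : Int) = some p0 := by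
    simp [PySem.List.pyGet?, PySem.List.pyIdx?]
  unfold overlap_graph_problem overlap_graph_problem_alt
  rw [hget]
  apply congrArg (fun d : PySem.Dict String String => d.items)
  apply PySem.List.foldl_congr_mem
  intro a p _
  have hpd := pvGet_prefix_dict (PySem.Str.len p0) (p0 :: t0) PySem.Dict.empty
    (pvSufOf (PySem.Str.len p0) p)
  rw [PySem.Dict.get?_empty] at hpd
  simp only [Option.getD_none] at hpd
  dsimp only
  rw [pvValB_eq_filter_fold, hpd]
  by_cases hm : (p0 :: t0).filter
      (fun q => pvKeyOf (PySem.Str.len p0) q == pvSufOf (PySem.Str.len p0) p) = []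
  · rw [if_pos hm, hm]
    simp
  · rw [if_neg hm]
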